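-- pv_equiv track=rewrite | github.com/dgenio/agent-kernel | src/agent_kernel/firewall/transform.py | _cap_facts
-- ===== SOURCE A (Python) =====
-- def _cap_facts(facts: list[str], max_chars: int) -> list[str]:
--     """Return as many facts as fit within *max_chars* total."""
--     total = 0
--     result: list[str] = []
--     for fact in facts:
--         total += len(fact)
--         if total > max_chars:
--             break
--         result.append(fact)
--     return result
-- ===== SOURCE B (Python) =====
-- from itertools import accumulate
-- from bisect import bisect_right
--
-- def _cap_facts(facts: list[str], max_chars: int) -> list[str]:
--     """Return as many facts as fit within *max_chars* total."""
--     prefixes = list(accumulate(len(f) for f in facts))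
--     k = bisect_right(prefixes, max_chars)
--     return facts[:k]
-- ===== Notes on version B (the rewrite author's own statement) =====
-- stated objective: idiomatic
-- what changed: Replaces the running-total loop with early break by building a cumulative-length table (itertools.accumulate) and locating the cut point with bisect_right, returning facts[:k].
import Mathlib
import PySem

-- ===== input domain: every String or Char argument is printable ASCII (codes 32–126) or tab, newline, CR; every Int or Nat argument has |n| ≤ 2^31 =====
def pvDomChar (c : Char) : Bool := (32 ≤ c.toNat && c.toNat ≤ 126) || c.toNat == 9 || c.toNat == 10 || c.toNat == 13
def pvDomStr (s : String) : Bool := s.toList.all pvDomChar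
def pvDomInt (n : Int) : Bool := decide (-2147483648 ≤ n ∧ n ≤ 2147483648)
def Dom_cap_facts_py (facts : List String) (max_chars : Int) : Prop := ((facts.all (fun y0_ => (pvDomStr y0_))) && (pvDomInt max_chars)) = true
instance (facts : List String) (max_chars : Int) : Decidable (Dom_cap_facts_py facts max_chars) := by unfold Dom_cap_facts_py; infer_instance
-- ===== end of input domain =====

-- B replaces A's running-total loop with an accumulate-then-bisect cut point (facts.take k); same values, different decomposition.

-- ===== PORT A =====
-- the for-loop with break, carrying the running total; result built front-to-back
def capFactsGo (facts : List String) (total : Int) (max_chars : Int) : List String :=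
  match facts with
  | [] => []
  | f :: rest =>
    let total' := total + PySem.Str.len f
    if total' > max_chars then [] else f :: capFactsGo rest total' max_chars

def cap_facts_py (facts : List String) (max_chars : Int) : List String :=
  capFactsGo facts 0 max_chars

-- ===== PORT B =====
-- itertools.accumulate over the lengths, carrying the running sum
def capAccum (lens : List Int) (acc : Int) : List Int :=
  match lens with
  | [] => []
  | x :: rest => (acc + x) :: capAccum rest (acc + x)

def cap_facts_py_alt (facts : List String) (max_chars : Int) : List String :=
  let prefixes := capAccum (facts.map PySem.Str.len) 0
  -- bisect_right on the (nondecreasing) prefix table = length of the ≤-prefix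
  let k := (prefixes.takeWhile (fun p => p ≤ max_chars)).length
  facts.take k

-- ===== PRECONDITION & SPEC =====
def Spec_cap_facts_py (facts : List String) (max_chars : Int) (out : List String) : Prop := out = cap_facts_py_alt facts max_chars
instance (facts : List String) (max_chars : Int) (out : List String) : Decidable (Spec_cap_facts_py facts max_chars out) := by unfold Spec_cap_facts_py; infer_instance

-- ===== CLAIM (what is proved, stated in full; the proofs are below) =====
def Claim_equal_cap_facts_py : Prop := ∀ (facts : List String) (max_chars : Int), Dom_cap_facts_py facts max_chars → Spec_cap_facts_py facts max_chars (cap_facts_py facts max_chars)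

-- ===== LEMMAS AND PROOFS =====
theorem capFactsGo_eq (facts : List String) (t mc : Int) :
    capFactsGo facts t mc =
      facts.take ((capAccum (facts.map PySem.Str.len) t).takeWhile (fun p => p ≤ mc)).length := by
  induction facts generalizing t with
  | nil => simp [capFactsGo, capAccum]
  | cons f rest ih =>
    simp only [capFactsGo, capAccum, List.map, List.takeWhile]
    by_cases h : t + PySem.Str.len f ≤ mc
    · rw [if_neg (not_lt.mpr h)]
      simp [PySem.Str.len] at h
      simp [h, ih]
    · rw [if_pos (not_le.mp h)]
      simp [PySem.Str.len] at h
      simp [decide_eq_false (not_le.mpr h)]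

-- ===== VERDICT (by name: the statement is the Claim_ definition above) =====
theorem cap_facts_py_spec : Claim_equal_cap_facts_py := by
  intro facts mc _
  unfold Spec_cap_facts_py cap_facts_py cap_facts_py_alt
  exact capFactsGo_eq facts 0 mc
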